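-- pv_equiv track=rewrite | github.com/vladfrunzescu/TabuSearchAlgorithm | TabuSearch.py | find_neighborhood
-- ===== SOURCE A (Python) =====
-- import copy
--
-- def find_neighborhood(solution, dMatrix):
--
--     neighborhood_of_solution = []
--
--     for n in solution[1:-1]:
--         idx1 = solution.index(n)
--         for kn in solution[1:-1]:
--             idx2 = solution.index(kn)
--             if n == kn:
--                 continue
--
--             _tmp = copy.deepcopy(solution)
--             _tmp[idx1] = kn
--             _tmp[idx2] = n
--
--             distance = 0
--
--             for k in _tmp[:-1]:
--                 next_node = _tmp[_tmp.index(k) + 1]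
--                 distance += dMatrix[k][next_node]
--
--             _tmp.append(distance)
--
--             if _tmp not in neighborhood_of_solution:
--                 neighborhood_of_solution.append(_tmp)
--
--     if(len(neighborhood_of_solution) > 0):
--         indexOfLastItemInTheList = len(neighborhood_of_solution[0]) - 1
--         neighborhood_of_solution.sort(key=lambda x: x[indexOfLastItemInTheList])
--     else:
--         neighborhood_of_solution.append(solution)
--     return neighborhood_of_solution
-- ===== SOURCE B (Python) =====
-- def find_neighborhood(solution, dMatrix):
--     m = len(solution)
--     if m < 4:
--         return [solution]
--     cands = []
--     for i in range(1, m - 1):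
--         for j in range(i + 1, m - 1):
--             t = list(solution)
--             t[i], t[j] = t[j], t[i]
--             d = 0
--             for a, b in zip(t, t[1:]):
--                 d += dMatrix[a][b]
--             cands.append(t + [d])
--     cands.sort(key=lambda x: x[-1])
--     return cands
-- ===== Notes on version B (the rewrite author's own statement) =====
-- stated objective: faster
-- what changed: B replaces A's value-based solution.index()/_tmp.index() lookups, per-candidate deepcopy and 'not in neighborhood' full-list dedup scans with a direct i<j position double loop that generates each swap candidate exactly once and sums the distance over zip(t, t[1:]), then sorts once.
-- outside the precondition, e.g. on find_neighborhood([0, 0, 1, 0], [[1, 2], [3, 4]]): A returns [[1, 0, 0, 0, 5]], B returns [[0, 1, 0, 0, 6]]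
import Mathlib
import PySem

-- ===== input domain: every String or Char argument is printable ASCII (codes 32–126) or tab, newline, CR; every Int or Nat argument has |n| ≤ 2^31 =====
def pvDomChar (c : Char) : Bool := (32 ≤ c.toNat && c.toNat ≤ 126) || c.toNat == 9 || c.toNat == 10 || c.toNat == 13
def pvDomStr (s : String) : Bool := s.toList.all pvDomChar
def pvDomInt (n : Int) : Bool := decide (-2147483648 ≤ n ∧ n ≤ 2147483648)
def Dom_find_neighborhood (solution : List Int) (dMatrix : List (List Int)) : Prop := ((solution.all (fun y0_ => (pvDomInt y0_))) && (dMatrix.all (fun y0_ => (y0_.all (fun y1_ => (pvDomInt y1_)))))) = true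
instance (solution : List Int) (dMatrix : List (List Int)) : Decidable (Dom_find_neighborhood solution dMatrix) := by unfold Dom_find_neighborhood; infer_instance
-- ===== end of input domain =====

-- B replaces A's value-based index() lookups, per-candidate deepcopy and repeated full-list membership
-- dedup with a direct i<j position loop that generates each candidate exactly once, summing distances
-- over consecutive pairs (objective: faster). Equivalence is about the RETURN value (A sorts its fresh
-- local list in place before returning it; neither argument is mutated).

-- ===== PORT A =====
def find_neighborhood (solution : List Int) (dMatrix : List (List Int)) : List (List Int) :=
  let interior := PySem.List.slice solution (some 1) (some (-1))
  let nbhd := interior.foldl (fun acc n =>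
    let idx1 : Nat := (PySem.List.index? solution n).getD 0
    interior.foldl (fun acc kn =>
      let idx2 : Nat := (PySem.List.index? solution kn).getD 0
      if n == kn then acc
      else
        let t := PySem.List.pySetD (PySem.List.pySetD solution (idx1 : Int) kn) (idx2 : Int) n
        let distance := (PySem.List.slice t none (some (-1))).foldl
          (fun d k =>
            d + PySem.List.pyGetD (PySem.List.pyGetD dMatrix k [])
                  (PySem.List.pyGetD t ((((PySem.List.index? t k).getD 0 : Nat) : Int) + 1) 0) 0) 0
        let t2 := t ++ [distance]
        if t2 ∈ acc then acc else acc ++ [t2]) acc) []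
  if 0 < nbhd.length then
    let lastIdx : Int := (PySem.List.pyGetD nbhd 0 []).length - 1
    PySem.List.sorted nbhd (fun x => PySem.List.pyGetD x lastIdx 0) false
  else nbhd ++ [solution]

-- ===== PORT B =====
def find_neighborhood_alt (solution : List Int) (dMatrix : List (List Int)) : List (List Int) :=
  let m := solution.length
  if m < 4 then [solution]
  else
    let cands := (PySem.List.pyRange 1 ((m : Int) - 1) 1).foldl (fun acc i =>
      (PySem.List.pyRange (i + 1) ((m : Int) - 1) 1).foldl (fun acc j =>
        let a := PySem.List.pyGetD solution i 0
        let b := PySem.List.pyGetD solution j 0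
        let t := PySem.List.pySetD (PySem.List.pySetD solution i b) j a
        let d := (t.zip (PySem.List.slice t (some 1) none)).foldl
          (fun d p => d + PySem.List.pyGetD (PySem.List.pyGetD dMatrix p.1 []) p.2 0) 0
        acc ++ [t ++ [d]]) acc) []
    PySem.List.sorted cands (fun x => PySem.List.pyGetD x (-1) 0) false

-- ===== PRECONDITION & SPEC =====
-- Pre_ excludes, among the lists of length ≥ 4 (shorter tours have no swaps and are returned as-is),
-- (a) tours with a duplicate value before the last element, where A's value-based first-occurrence
-- index() lookups are an accident of its implementation, and (b) it over-approximates the matrix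
-- accesses by requiring dMatrix[u][v] to exist for EVERY pair of tour nodes, while A only reads
-- the consecutive pairs of the swapped tours (A raises IndexError when an entry it reads is missing).
def Pre_find_neighborhood (solution : List Int) (dMatrix : List (List Int)) : Prop :=
  solution.length ≤ 3 ∨
  (solution.dropLast.Nodup ∧
   ∀ u ∈ solution, ∀ v ∈ solution,
     (Option.bind (PySem.List.pyGet? dMatrix u) (fun row => PySem.List.pyGet? row v)).isSome = true)
instance (solution : List Int) (dMatrix : List (List Int)) : Decidable (Pre_find_neighborhood solution dMatrix) := by unfold Pre_find_neighborhood; infer_instance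

def pvWitness_find_neighborhood : List Int × List (List Int) :=
  ([0, 1, 2, 0], [[0, 1, 2], [3, 0, 4], [5, 6, 0]])

def Spec_find_neighborhood (solution : List Int) (dMatrix : List (List Int)) (out : List (List Int)) : Prop := out = find_neighborhood_alt solution dMatrix
instance (solution : List Int) (dMatrix : List (List Int)) (out : List (List Int)) : Decidable (Spec_find_neighborhood solution dMatrix out) := by unfold Spec_find_neighborhood; infer_instance

-- ===== CLAIM (what is proved, stated in full; the proofs are below) =====
def Claim_equal_find_neighborhood : Prop := ∀ (solution : List Int) (dMatrix : List (List Int)), Dom_find_neighborhood solution dMatrix → Pre_find_neighborhood solution dMatrix → Spec_find_neighborhood solution dMatrix (find_neighborhood solution dMatrix)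

-- ===== LEMMAS AND PROOFS =====

-- the common candidate: swap positions i and j, append the tour's edge-sum
def pvW (dMatrix : List (List Int)) (a b : Int) : Int :=
  PySem.List.pyGetD (PySem.List.pyGetD dMatrix a []) b 0

def pvEdgeSum (dMatrix : List (List Int)) (t : List Int) : Int :=
  (t.zip t.tail).foldl (fun d p => d + pvW dMatrix p.1 p.2) 0

def pvT (s : List Int) (i j : Nat) : List Int :=
  (s.set i (s.getD j 0)).set j (s.getD i 0)

def pvG (s : List Int) (dMatrix : List (List Int)) (i j : Nat) : List Int :=
  pvT s i j ++ [pvEdgeSum dMatrix (pvT s i j)]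

def pvNews (s : List Int) (dMatrix : List (List Int)) (m i : Nat) : List (List Int) :=
  (List.range' (i + 1) (m - 2 - i)).map (pvG s dMatrix i)

def pvFull (s : List Int) (dMatrix : List (List Int)) (m k : Nat) : List (List Int) :=
  (List.range' 1 (k - 1)).flatMap (pvNews s dMatrix m)

-- A's (deduplicating) inner-loop body, expressed over positions
def pvInner (s : List Int) (dM : List (List Int)) (a : Nat) (acc : List (List Int)) (j : Nat) :
    List (List Int) :=
  if a = j then acc else if pvG s dM a j ∈ acc then acc else acc ++ [pvG s dM a j]

lemma pv_dropLast_set (xs : List Int) (n : Nat) (a : Int) :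
    (xs.set n a).dropLast = xs.dropLast.set n a := by
  apply List.ext_getElem
  · simp
  intro k h1 h2
  simp only [List.getElem_dropLast, List.getElem_set]

lemma pv_interior_eq (s : List Int) :
    PySem.List.slice s (some 1) (some (-1)) = s.dropLast.tail := by
  cases s with
  | nil => rfl
  | cons x xs =>
    simp only [PySem.List.slice, PySem.List.clampIdx, List.dropLast_eq_take]
    cases xs with
    | nil => rfl
    | cons y ys =>
      simp
      rw [if_neg (by exact Int.not_lt.mpr (by positivity))]
      simp

lemma pv_tail_dropLast_eq_map (s : List Int) :
    s.dropLast.tail = (List.range' 1 (s.length - 2)).map (fun p => s.getD p 0) := by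
  apply List.ext_getElem
  · simp [List.length_tail]; omega
  intro k h1 h2
  simp only [List.getElem_tail, List.getElem_dropLast, List.getElem_map, List.getElem_range']
  rw [List.getD_eq_getElem?_getD]
  simp only [List.length_tail, List.length_dropLast] at h1
  rw [List.getElem?_eq_getElem (by omega)]
  simp [Nat.add_comm]

lemma pv_idx_first (t : List Int) (h : t.dropLast.Nodup) (p : Nat) (hp : p + 1 < t.length) :
    PySem.List.index? t (t.getD p 0) = some p := by
  rw [PySem.List.index?_eq_some_iff]
  refine ⟨t.take p, t.drop (p + 1), ?_, ?_, ?_⟩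
  · rw [List.getD_eq_getElem?_getD, List.getElem?_eq_getElem (by omega)]
    simp only [Option.getD_some]
    rw [List.getElem_cons_drop, List.take_append_drop]
  · simp; omega
  · intro hmem
    rw [List.getD_eq_getElem?_getD, List.getElem?_eq_getElem (by omega)] at hmem
    simp only [Option.getD_some] at hmem
    obtain ⟨q, hq, hqe⟩ := List.getElem_of_mem hmem
    rw [List.getElem_take] at hqe
    have hql : q < t.dropLast.length := by simp [List.length_take] at hq ⊢; omega
    have hpl : p < t.dropLast.length := by simp; omega
    have hqp : q = p := by
      have h2 := (List.Nodup.getElem_inj_iff h (hi := hql) (hj := hpl)).mp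
      simp only [List.getElem_dropLast] at h2
      exact h2 (by rw [hqe])
    simp [List.length_take] at hq
    omega

lemma pv_val_inj (s : List Int) (h : s.dropLast.Nodup) (p q : Nat)
    (hp : p + 1 < s.length) (hq : q + 1 < s.length) (he : s.getD p 0 = s.getD q 0) : p = q := by
  have hp' : p < s.dropLast.length := by simp; omega
  have hq' : q < s.dropLast.length := by simp; omega
  have e1 : s.getD p 0 = s.dropLast[p] := by
    rw [List.getD_eq_getElem?_getD, List.getElem?_eq_getElem (by omega)]
    simp [List.getElem_dropLast]
  have e2 : s.getD q 0 = s.dropLast[q] := by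
    rw [List.getD_eq_getElem?_getD, List.getElem?_eq_getElem (by omega)]
    simp [List.getElem_dropLast]
  exact (List.Nodup.getElem_inj_iff h).mp (by rw [← e1, ← e2, he])

lemma pv_nodup_dropLast_set2 (s : List Int) (h : s.dropLast.Nodup) (i j : Nat)
    (hi : i + 1 < s.length) (hj : j + 1 < s.length) :
    ((s.set i (s.getD j 0)).set j (s.getD i 0)).dropLast.Nodup := by
  rw [pv_dropLast_set, pv_dropLast_set]
  set dl := s.dropLast with hdl
  have hlen : dl.length = s.length - 1 := by simp [hdl]
  have hsj : s.getD j 0 = dl[j]'(by omega) := by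
    rw [List.getD_eq_getElem?_getD, List.getElem?_eq_getElem (by omega)]
    simp [hdl, List.getElem_dropLast]
  have hsi : s.getD i 0 = dl[i]'(by omega) := by
    rw [List.getD_eq_getElem?_getD, List.getElem?_eq_getElem (by omega)]
    simp [hdl, List.getElem_dropLast]
  rw [hsj, hsi]
  rw [List.nodup_iff_getElem?_ne_getElem?] at h ⊢
  intro k l hkl hl
  simp only [List.length_set] at hl
  rw [List.getElem?_eq_getElem (by simp; omega), List.getElem?_eq_getElem (by simp; omega)]
  simp only [List.getElem_set]
  have hinj : ∀ (p q : Nat) (hp : p < dl.length) (hq : q < dl.length), dl[p] = dl[q] → p = q := by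
    intro p q hp hq hpq
    exact (List.Nodup.getElem_inj_iff (by rw [List.nodup_iff_getElem?_ne_getElem?]; exact h)).mp hpq
  split_ifs <;> (intro he; first
    | omega
    | (have := hinj _ _ (by omega) (by omega) (Option.some.inj he); omega))

lemma pv_length_pvT (s : List Int) (i j : Nat) : (pvT s i j).length = s.length := by
  simp [pvT]

lemma pv_getD_pvT (s : List Int) (i j p : Nat) (hi : i < s.length) (hj : j < s.length) :
    (pvT s i j).getD p 0 =
      if p = j then s.getD i 0 else if p = i then s.getD j 0 else s.getD p 0 := by
  by_cases hp : p < s.length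
  · simp only [pvT, List.getD_eq_getElem?_getD]
    rw [List.getElem?_eq_getElem (by simpa using hp)]
    simp only [List.getElem_set]
    rw [List.getElem?_eq_getElem hi, List.getElem?_eq_getElem hj, List.getElem?_eq_getElem hp]
    simp only [Option.getD_some]
    split_ifs <;> first
      | rfl
      | omega
  · have h1 : p ≠ j := by omega
    have h2 : p ≠ i := by omega
    rw [List.getD_eq_getElem?_getD, List.getElem?_eq_none (by simp only [pvT, List.length_set]; omega)]
    rw [if_neg h1, if_neg h2, List.getD_eq_getElem?_getD, List.getElem?_eq_none (by omega)]

lemma pv_pvT_symm (s : List Int) (i j : Nat) (hij : i ≠ j) : pvT s i j = pvT s j i := by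
  unfold pvT
  rw [List.set_comm _ _ hij]

lemma pv_pvG_symm (s : List Int) (dM : List (List Int)) (i j : Nat) (hij : i ≠ j) :
    pvG s dM i j = pvG s dM j i := by
  unfold pvG
  rw [pv_pvT_symm s i j hij]

lemma pv_pvT_inj (s : List Int) (h : s.dropLast.Nodup) (i j i' j' : Nat)
    (hij : i < j) (hj : j + 1 < s.length) (hij' : i' < j') (hj' : j' + 1 < s.length)
    (heq : pvT s i j = pvT s i' j') : i = i' ∧ j = j' := by
  have hgd : ∀ p : Nat, (pvT s i j).getD p 0 = (pvT s i' j').getD p 0 := by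
    intro p; rw [heq]
  have hi := hgd i
  rw [pv_getD_pvT s i j i (by omega) (by omega),
      pv_getD_pvT s i' j' i (by omega) (by omega)] at hi
  rw [if_neg (by omega), if_pos rfl] at hi
  by_cases hc1 : i = j'
  · rw [if_pos hc1] at hi
    have := pv_val_inj s h j i' (by omega) (by omega) hi
    omega
  · rw [if_neg hc1] at hi
    by_cases hc2 : i = i'
    · rw [if_pos hc2] at hi
      have := pv_val_inj s h j j' (by omega) (by omega) hi
      omega
    · rw [if_neg hc2] at hi
      have := pv_val_inj s h j i (by omega) (by omega) hi
      omega

lemma pv_pvG_inj (s : List Int) (dM : List (List Int)) (h : s.dropLast.Nodup) (i j i' j' : Nat)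
    (hij : i < j) (hj : j + 1 < s.length) (hij' : i' < j') (hj' : j' + 1 < s.length)
    (heq : pvG s dM i j = pvG s dM i' j') : i = i' ∧ j = j' := by
  unfold pvG at heq
  have := (List.append_inj heq (by rw [pv_length_pvT, pv_length_pvT])).1
  exact pv_pvT_inj s h i j i' j' hij hj hij' hj' this

lemma pv_mem_full (s : List Int) (dM : List (List Int)) (m k : Nat) (x : List Int) :
    x ∈ pvFull s dM m k ↔ ∃ i j, 1 ≤ i ∧ i < j ∧ j ≤ m - 2 ∧ i < k ∧ x = pvG s dM i j := by
  simp only [pvFull, pvNews, List.mem_flatMap, List.mem_map, List.mem_range'_1]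
  constructor
  · rintro ⟨i, ⟨hi1, hi2⟩, j, ⟨hj1, hj2⟩, rfl⟩
    exact ⟨i, j, by omega, by omega, by omega, by omega, rfl⟩
  · rintro ⟨i, j, h1, h2, h3, h4, rfl⟩
    exact ⟨i, ⟨by omega, by omega⟩, j, ⟨by omega, by omega⟩, rfl⟩

lemma pv_skip_fold (s : List Int) (dM : List (List Int)) (a : Nat) (l : List Nat)
    (acc : List (List Int)) (h : ∀ j ∈ l, a = j ∨ pvG s dM a j ∈ acc) :
    l.foldl (pvInner s dM a) acc = acc := by
  induction l with
  | nil => rfl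
  | cons j l ih =>
    simp only [List.foldl_cons]
    have hbody : pvInner s dM a acc j = acc := by
      unfold pvInner
      by_cases haj : a = j
      · rw [if_pos haj]
      · rw [if_neg haj]
        rcases h j (by simp) with h1 | h1
        · exact absurd h1 haj
        · rw [if_pos h1]
    rw [hbody]
    exact ih (fun j hj => h j (by simp [hj]))

lemma pv_app_fold (s : List Int) (dM : List (List Int)) (a : Nat) (l : List Nat)
    (acc : List (List Int)) (hne : ∀ j ∈ l, a ≠ j)
    (hnm : ∀ j ∈ l, pvG s dM a j ∉ acc)
    (hinj : ∀ j ∈ l, ∀ j' ∈ l, pvG s dM a j = pvG s dM a j' → j = j')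
    (hl : l.Nodup) :
    l.foldl (pvInner s dM a) acc = acc ++ l.map (pvG s dM a) := by
  induction l generalizing acc with
  | nil => simp
  | cons j l ih =>
    simp only [List.foldl_cons, List.map_cons]
    have hbody : pvInner s dM a acc j = acc ++ [pvG s dM a j] := by
      unfold pvInner
      rw [if_neg (hne j (by simp)), if_neg (hnm j (by simp))]
    rw [hbody]
    rw [ih _ (fun j' hj' => hne j' (by simp [hj']))
        ?hnm2 (fun x hx y hy he => hinj x (by simp [hx]) y (by simp [hy]) he) hl.of_cons]
    · simp
    case hnm2 =>
      intro j' hj' hmem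
      rw [List.mem_append] at hmem
      rcases hmem with hmem | hmem
      · exact hnm j' (by simp [hj']) hmem
      · simp only [List.mem_singleton] at hmem
        have hjj : j' = j := hinj j' (by simp [hj']) j (by simp) hmem
        subst hjj
        exact (List.nodup_cons.mp hl).1 hj'

lemma pv_inner_fold (s : List Int) (dM : List (List Int)) (h : s.dropLast.Nodup) (a : Nat)
    (ha1 : 1 ≤ a) (ha2 : a ≤ s.length - 2) :
    (List.range' 1 (s.length - 2)).foldl (pvInner s dM a) (pvFull s dM s.length a)
      = pvFull s dM s.length (a + 1) := by
  set m := s.length with hm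
  have hsplit : List.range' 1 (m - 2) = List.range' 1 (a - 1) ++ List.range' a (m - 1 - a) := by
    have := List.range'_append (s := 1) (m := a - 1) (n := m - 1 - a) (step := 1)
    rw [show (1 + 1 * (a - 1)) = a by omega] at this
    rw [show ((a - 1) + (m - 1 - a)) = m - 2 by omega] at this
    exact this.symm
  rw [hsplit, List.foldl_append]
  rw [pv_skip_fold s dM a (List.range' 1 (a - 1)) (pvFull s dM m a) ?hskip]
  case hskip =>
    intro j hj
    rw [List.mem_range'_1] at hj
    right
    rw [pv_pvG_symm s dM a j (by omega)]
    rw [pv_mem_full]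
    exact ⟨j, a, by omega, by omega, by omega, by omega, rfl⟩
  rw [show (m - 1 - a) = (m - 2 - a) + 1 by omega, List.range'_succ, List.foldl_cons]
  rw [show pvInner s dM a (pvFull s dM m a) a = pvFull s dM m a by unfold pvInner; rw [if_pos rfl]]
  rw [pv_app_fold s dM a _ _ ?hne ?hnm ?hinj (List.nodup_range' 1)]
  · show pvFull s dM m a ++ (List.range' (a + 1) (m - 2 - a)).map (pvG s dM a) = _
    have hstep : pvFull s dM m (a + 1) = pvFull s dM m a ++ pvNews s dM m a := by
      unfold pvFull
      rw [show (a + 1 - 1) = (a - 1) + 1 by omega, List.range'_concat,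
          show (1 + 1 * (a - 1)) = a by omega, List.flatMap_append]
      simp [pvNews]
    rw [hstep]; rfl
  case hne => intro j hj; rw [List.mem_range'_1] at hj; omega
  case hnm =>
    intro j hj hmem
    rw [List.mem_range'_1] at hj
    rw [pv_mem_full] at hmem
    obtain ⟨i', j', h1, h2, h3, h4, he⟩ := hmem
    have := pv_pvG_inj s dM h a j i' j' (by omega) (by omega) (by omega) (by omega) he
    omega
  case hinj =>
    intro j hj j' hj' he
    rw [List.mem_range'_1] at hj hj'
    exact (pv_pvG_inj s dM h a j a j' (by omega) (by omega) (by omega) (by omega) he).2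

lemma pv_outer_fold (s : List Int) (dM : List (List Int)) (h : s.dropLast.Nodup) :
    ∀ (n a : Nat), 1 ≤ a → a + n ≤ s.length - 1 →
    (List.range' a n).foldl
      (fun acc i => (List.range' 1 (s.length - 2)).foldl (pvInner s dM i) acc)
      (pvFull s dM s.length a)
      = pvFull s dM s.length (a + n) := by
  intro n
  induction n with
  | zero => intro a _ _; rfl
  | succ n ih =>
    intro a ha1 ha2
    rw [List.range'_succ, List.foldl_cons]
    rw [pv_inner_fold s dM h a ha1 (by omega)]
    have := ih (a + 1) (by omega) (by omega)
    rw [show a + (n + 1) = (a + 1) + n by omega]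
    exact this

lemma pv_full_sub1 (s : List Int) (dM : List (List Int)) (m k1 k2 : Nat) (h : k1 - 1 = k2 - 1) :
    pvFull s dM m k1 = pvFull s dM m k2 := by
  unfold pvFull; rw [h]

-- the walked distance of A equals the zip edge-sum
lemma pv_dropLast_eq_map (t : List Int) :
    t.dropLast = (List.range (t.length - 1)).map (fun p => t.getD p 0) := by
  apply List.ext_getElem
  · simp
  intro k h1 h2
  simp only [List.getElem_dropLast, List.getElem_map, List.getElem_range]
  rw [List.getD_eq_getElem?_getD, List.getElem?_eq_getElem (by simp at h1; omega)]
  rfl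

lemma pv_zip_tail_eq_map (t : List Int) :
    t.zip t.tail = (List.range (t.length - 1)).map (fun p => (t.getD p 0, t.getD (p + 1) 0)) := by
  apply List.ext_getElem
  · simp [List.length_zip, List.length_tail]
  intro k h1 h2
  simp only [List.getElem_zip, List.getElem_tail, List.getElem_map, List.getElem_range]
  have hk : k < t.length - 1 := by simp [List.length_zip, List.length_tail] at h1; omega
  rw [List.getD_eq_getElem?_getD, List.getElem?_eq_getElem (by omega),
      List.getD_eq_getElem?_getD, List.getElem?_eq_getElem (by omega)]
  rfl

lemma pv_walk (dM : List (List Int)) (t : List Int) (h : t.dropLast.Nodup) :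
    (PySem.List.slice t none (some (-1))).foldl
      (fun d k =>
        d + PySem.List.pyGetD (PySem.List.pyGetD dM k [])
              (PySem.List.pyGetD t ((((PySem.List.index? t k).getD 0 : Nat) : Int) + 1) 0) 0) 0
      = pvEdgeSum dM t := by
  rw [PySem.List.slice_to_neg_one]
  rw [pv_dropLast_eq_map, List.foldl_map]
  rw [pvEdgeSum, pv_zip_tail_eq_map, List.foldl_map]
  apply PySem.List.foldl_congr_mem
  intro acc p hp
  simp only [List.mem_range] at hp
  rw [pv_idx_first t h p (by omega)]
  simp only [Option.getD_some]
  rw [show ((p : Int) + 1) = ((p + 1 : Nat) : Int) from by push_cast; ring,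
      PySem.List.pyGetD_natCast]
  rfl

-- key congruence for the stable sort
lemma pv_insertBy_congr {α : Type} (b1 b2 : α → α → Bool) (x : α) (ys : List α)
    (h : ∀ y ∈ ys, b1 x y = b2 x y) :
    PySem.List.insertBy b1 x ys = PySem.List.insertBy b2 x ys := by
  induction ys with
  | nil => rfl
  | cons y ys ih =>
    simp only [PySem.List.insertBy]
    rw [h y (by simp)]
    split
    · rfl
    · rw [ih (fun z hz => h z (by simp [hz]))]

lemma pv_sorted_key_congr_aux (k1 k2 : List Int → Int) (xs acc : List (List Int))
    (h : ∀ x ∈ xs, k1 x = k2 x) (hacc : ∀ y ∈ acc, k1 y = k2 y) :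
    xs.foldl (fun acc x => PySem.List.insertBy (fun a b => decide (k1 a < k1 b)) x acc) acc
      = xs.foldl (fun acc x => PySem.List.insertBy (fun a b => decide (k2 a < k2 b)) x acc) acc := by
  induction xs generalizing acc with
  | nil => rfl
  | cons x xs ih =>
    simp only [List.foldl_cons]
    rw [pv_insertBy_congr _ _ x acc
      (fun y hy => by rw [h x (by simp), hacc y hy])]
    apply ih _ (fun z hz => h z (by simp [hz]))
    intro y hy
    rw [PySem.List.mem_insertBy] at hy
    rcases hy with rfl | hy
    · exact h y (by simp)
    · exact hacc y hy

lemma pv_sorted_key_congr (xs : List (List Int)) (k1 k2 : List Int → Int)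
    (h : ∀ x ∈ xs, k1 x = k2 x) :
    PySem.List.sorted xs k1 false = PySem.List.sorted xs k2 false := by
  rw [PySem.List.sorted_eq_foldl_insertBy, PySem.List.sorted_eq_foldl_insertBy]
  exact pv_sorted_key_congr_aux k1 k2 xs [] h (by simp)

-- A's accumulation loop equals the i<j enumeration
lemma pv_A_loop (s : List Int) (dM : List (List Int)) (h : s.dropLast.Nodup) :
    (PySem.List.slice s (some 1) (some (-1))).foldl (fun acc n =>
      (PySem.List.slice s (some 1) (some (-1))).foldl (fun acc kn =>
        if n == kn then acc
        else
          let t := PySem.List.pySetD (PySem.List.pySetD s (((PySem.List.index? s n).getD 0 : Nat) : Int) kn) (((PySem.List.index? s kn).getD 0 : Nat) : Int) n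
          let distance := (PySem.List.slice t none (some (-1))).foldl
            (fun d k =>
              d + PySem.List.pyGetD (PySem.List.pyGetD dM k [])
                    (PySem.List.pyGetD t ((((PySem.List.index? t k).getD 0 : Nat) : Int) + 1) 0) 0) 0
          let t2 := t ++ [distance]
          if t2 ∈ acc then acc else acc ++ [t2]) acc) []
      = pvFull s dM s.length (s.length - 1) := by
  set m := s.length with hm
  rw [pv_interior_eq, pv_tail_dropLast_eq_map, ← hm, List.foldl_map]
  have hinnereq : ∀ (acc : List (List Int)), ∀ i ∈ List.range' 1 (m - 2),
      ((List.range' 1 (m - 2)).map (fun p => s.getD p 0)).foldl (fun acc kn =>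
        if s.getD i 0 == kn then acc
        else
          let t := PySem.List.pySetD (PySem.List.pySetD s (((PySem.List.index? s (s.getD i 0)).getD 0 : Nat) : Int) kn) (((PySem.List.index? s kn).getD 0 : Nat) : Int) (s.getD i 0)
          let distance := (PySem.List.slice t none (some (-1))).foldl
            (fun d k =>
              d + PySem.List.pyGetD (PySem.List.pyGetD dM k [])
                    (PySem.List.pyGetD t ((((PySem.List.index? t k).getD 0 : Nat) : Int) + 1) 0) 0) 0
          let t2 := t ++ [distance]
          if t2 ∈ acc then acc else acc ++ [t2]) acc
      = (List.range' 1 (m - 2)).foldl (pvInner s dM i) acc := by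
    intro acc i hi
    rw [List.mem_range'_1] at hi
    have hi1 : i + 1 < m := by omega
    rw [List.foldl_map]
    apply PySem.List.foldl_congr_mem
    intro acc' j hj
    rw [List.mem_range'_1] at hj
    have hj1 : j + 1 < m := by omega
    simp only
    rw [pv_idx_first s h i hi1, pv_idx_first s h j hj1]
    simp only [Option.getD_some, PySem.List.pySetD_natCast]
    rw [pv_walk dM ((s.set i (s.getD j 0)).set j (s.getD i 0))
      (pv_nodup_dropLast_set2 s h i j hi1 hj1)]
    by_cases hij : i = j
    · subst hij
      rw [if_pos (by simp), pvInner, if_pos rfl]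
    · rw [if_neg ?hne]
      case hne =>
        simp only [beq_iff_eq]
        intro he
        exact hij (pv_val_inj s h i j hi1 hj1 he)
      rw [pvInner, if_neg hij]
      rfl
  rw [PySem.List.foldl_congr_mem _ _ _ _ hinnereq]
  by_cases hm2 : 2 ≤ m
  · have h0 : ([] : List (List Int)) = pvFull s dM m 1 := by simp [pvFull]
    rw [h0]
    rw [pv_outer_fold s dM h (m - 2) 1 (by omega) (by omega)]
    exact pv_full_sub1 s dM m _ _ (by omega)
  · have hz : m - 2 = 0 := by omega
    rw [hz]
    simp [pvFull, show m - 1 - 1 = 0 by omega]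

-- B's candidate, with Python's Int indices, equals the positional candidate
lemma pv_cand_cast (s : List Int) (dM : List (List Int)) (i j : Nat) :
    PySem.List.pySetD (PySem.List.pySetD s (i : Int) (PySem.List.pyGetD s (j : Int) 0)) (j : Int) (PySem.List.pyGetD s (i : Int) 0) ++
      [((PySem.List.pySetD (PySem.List.pySetD s (i : Int) (PySem.List.pyGetD s (j : Int) 0)) (j : Int) (PySem.List.pyGetD s (i : Int) 0)).zip
          (PySem.List.slice (PySem.List.pySetD (PySem.List.pySetD s (i : Int) (PySem.List.pyGetD s (j : Int) 0)) (j : Int) (PySem.List.pyGetD s (i : Int) 0)) (some 1) none)).foldl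
        (fun d p => d + PySem.List.pyGetD (PySem.List.pyGetD dM p.1 []) p.2 0) 0]
      = pvG s dM i j := by
  simp only [PySem.List.pySetD_natCast, PySem.List.pyGetD_natCast, PySem.List.slice_from_one,
    pvG, pvT, pvEdgeSum, pvW]

-- B's accumulation loop equals the same list
lemma pv_B_loop (s : List Int) (dM : List (List Int)) :
    (PySem.List.pyRange 1 ((s.length : Int) - 1) 1).foldl (fun acc i =>
      (PySem.List.pyRange (i + 1) ((s.length : Int) - 1) 1).foldl (fun acc j =>
        acc ++ [PySem.List.pySetD (PySem.List.pySetD s i (PySem.List.pyGetD s j 0)) j (PySem.List.pyGetD s i 0) ++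
          [((PySem.List.pySetD (PySem.List.pySetD s i (PySem.List.pyGetD s j 0)) j (PySem.List.pyGetD s i 0)).zip
              (PySem.List.slice (PySem.List.pySetD (PySem.List.pySetD s i (PySem.List.pyGetD s j 0)) j (PySem.List.pyGetD s i 0)) (some 1) none)).foldl
            (fun d p => d + PySem.List.pyGetD (PySem.List.pyGetD dM p.1 []) p.2 0) 0]]) acc) []
      = pvFull s dM s.length (s.length - 1) := by
  set m := s.length with hm
  rw [PySem.List.foldl_congr_mem _ _
    (fun acc i => acc ++ ((PySem.List.pyRange (i + 1) ((m : Int) - 1) 1).map (fun j =>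
      PySem.List.pySetD (PySem.List.pySetD s i (PySem.List.pyGetD s j 0)) j (PySem.List.pyGetD s i 0) ++
        [((PySem.List.pySetD (PySem.List.pySetD s i (PySem.List.pyGetD s j 0)) j (PySem.List.pyGetD s i 0)).zip
            (PySem.List.slice (PySem.List.pySetD (PySem.List.pySetD s i (PySem.List.pyGetD s j 0)) j (PySem.List.pyGetD s i 0)) (some 1) none)).foldl
          (fun d p => d + PySem.List.pyGetD (PySem.List.pyGetD dM p.1 []) p.2 0) 0]))) _
    (fun acc i _ => PySem.List.foldl_append_singleton_eq_map _ _ _)]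
  rw [PySem.List.foldl_append_eq_flatMap]
  rw [List.nil_append]
  rw [PySem.List.pyRange_one, pvFull, List.range'_eq_map_range]
  rw [List.flatMap_map, List.flatMap_map]
  rw [show ((m : Int) - 1 - 1).toNat = m - 1 - 1 from by omega]
  apply List.flatMap_congr
  intro k hk
  rw [List.mem_range] at hk
  rw [pvNews, List.range'_eq_map_range, List.map_map, PySem.List.pyRange_one, List.map_map]
  rw [show ((m : Int) - 1 - (1 + (k : Int) + 1)).toNat = m - 2 - (1 + k) from by omega]
  apply List.map_congr_left
  intro k' hk'
  rw [List.mem_range] at hk'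
  rw [show (1 + (k : Int)) = ((1 + k : Nat) : Int) from by push_cast; ring]
  show (fun j =>
      PySem.List.pySetD (PySem.List.pySetD s ((1 + k : Nat)) (PySem.List.pyGetD s j 0)) j
          (PySem.List.pyGetD s ((1 + k : Nat)) 0) ++
        [List.foldl (fun d p => d + PySem.List.pyGetD (PySem.List.pyGetD dM p.1 []) p.2 0) 0
            ((PySem.List.pySetD (PySem.List.pySetD s ((1 + k : Nat)) (PySem.List.pyGetD s j 0)) j
                  (PySem.List.pyGetD s ((1 + k : Nat)) 0)).zip
              (PySem.List.slice
                (PySem.List.pySetD (PySem.List.pySetD s ((1 + k : Nat)) (PySem.List.pyGetD s j 0)) j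
                  (PySem.List.pyGetD s ((1 + k : Nat)) 0))
                (some 1)))]) (((1 + k : Nat) : Int) + 1 + (k' : Int))
      = pvG s dM (1 + k) (1 + k + 1 + k')
  rw [show (((1 + k : Nat) : Int) + 1 + (k' : Int)) = ((1 + k + 1 + k' : Nat) : Int) from by push_cast; ring]
  exact pv_cand_cast s dM (1 + k) (1 + k + 1 + k')

lemma pv_full_pos (s : List Int) (dM : List (List Int)) (hm : 4 ≤ s.length) :
    pvG s dM 1 2 ∈ pvFull s dM s.length (s.length - 1) := by
  rw [pv_mem_full]
  exact ⟨1, 2, by omega, by omega, by omega, by omega, rfl⟩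

lemma pv_length_mem_full (s : List Int) (dM : List (List Int)) (x : List Int)
    (hx : x ∈ pvFull s dM s.length (s.length - 1)) : x.length = s.length + 1 := by
  rw [pv_mem_full] at hx
  obtain ⟨i, j, _, _, _, _, rfl⟩ := hx
  simp [pvG, pv_length_pvT]

lemma pv_key_eq (s : List Int) (dM : List (List Int)) (x : List Int)
    (hx : x ∈ pvFull s dM s.length (s.length - 1)) :
    PySem.List.pyGetD x ((s.length : Int)) 0 = PySem.List.pyGetD x (-1) 0 := by
  rw [pv_mem_full] at hx
  obtain ⟨i, j, _, _, _, _, rfl⟩ := hx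
  rw [pvG, PySem.List.pyGetD_neg_one_append_singleton]
  rw [show ((s.length : Nat) : Int) = ((pvT s i j).length : Int) from by rw [pv_length_pvT]]
  rw [PySem.List.pyGetD_natCast, List.getD_eq_getElem?_getD,
      List.getElem?_eq_getElem (by simp), List.getElem_append_right (by simp)]
  simp

-- for tours without swaps, A's loop produces nothing (no Nodup needed)
lemma pv_A_loop_small (s : List Int) (hm : s.length < 4)
    (body : List (List Int) → Int → Int → List (List Int)) :
    (PySem.List.slice s (some 1) (some (-1))).foldl (fun acc n =>
      (PySem.List.slice s (some 1) (some (-1))).foldl (fun acc kn =>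
        if n == kn then acc else body acc n kn) acc) []
      = [] := by
  rw [pv_interior_eq]
  have hlen : s.dropLast.tail.length ≤ 1 := by simp [List.length_tail]; omega
  rcases he : s.dropLast.tail with _ | ⟨a, _ | ⟨b, l⟩⟩
  · rfl
  · simp
  · rw [he] at hlen; simp at hlen

-- ===== VERDICT (by name: the statement is the Claim_ definition above) =====
theorem find_neighborhood_spec : Claim_equal_find_neighborhood := by
  intro s dM hdom hpre
  unfold Spec_find_neighborhood
  simp only [find_neighborhood, find_neighborhood_alt]
  by_cases hm : s.length < 4
  · rw [pv_A_loop_small s hm]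
    rw [if_neg (by simp), if_pos hm]
    rfl
  · have hpre' : s.dropLast.Nodup := by
      rcases hpre with h3 | ⟨hnd, _⟩
      · omega
      · exact hnd
    rw [pv_A_loop s dM hpre']
    rw [if_neg hm, pv_B_loop s dM]
    rw [if_pos (List.length_pos_of_mem (pv_full_pos s dM (by omega)))]
    obtain ⟨c, rest, hc⟩ : ∃ c rest, pvFull s dM s.length (s.length - 1) = c :: rest := by
      rcases he : pvFull s dM s.length (s.length - 1) with _ | ⟨c, rest⟩
      · exact absurd (pv_full_pos s dM (by omega)) (by simp [he])
      · exact ⟨c, rest, rfl⟩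
    have hlen : (PySem.List.pyGetD (pvFull s dM s.length (s.length - 1)) 0 []).length = s.length + 1 := by
      rw [hc, PySem.List.pyGetD_zero_cons]
      exact pv_length_mem_full s dM c (by rw [hc]; simp)
    rw [hlen]
    rw [show ((s.length + 1 : Nat) : Int) - 1 = ((s.length : Nat) : Int) from by push_cast; ring]
    exact pv_sorted_key_congr _ _ _ (fun x hx => pv_key_eq s dM x hx)
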